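-- pv_equiv track=rewrite | github.com/benoitlx/aoc2025 | day6/trash_compactor.py | spans
-- ===== SOURCE A (Python) =====
-- def is_blank_col(grid, c):
--     return all(row[c] == ' ' for row in grid)
--
-- def spans(grid, w):
--     res = []
--     c = 0
--     while c < w:
--         if is_blank_col(grid, c):
--             c += 1
--         else:
--             s = c
--             while c < w and not is_blank_col(grid, c):
--                 c += 1
--             res.append((s, c))
--     return res
-- ===== SOURCE B (Python) =====
-- def is_blank_col(grid, c):
--     return all(row[c] == ' ' for row in grid)
--
-- def spans(grid, w):
--     # Boundary detection: collect left edges and right edges of runs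
--     # independently, then pair them up positionally.
--     starts = [c for c in range(w)
--               if not is_blank_col(grid, c)
--               and (c == 0 or is_blank_col(grid, c - 1))]
--     ends = [c + 1 for c in range(w)
--             if not is_blank_col(grid, c)
--             and (c == w - 1 or is_blank_col(grid, c + 1))]
--     return list(zip(starts, ends))
-- ===== Notes on version B (the rewrite author's own statement) =====
-- stated objective: alternative
-- what changed: A's stateful nested while-loops that consume whole runs are replaced by edge detection: one comprehension finds left boundaries (non-blank column whose left neighbour is blank or absent), another finds right boundaries (non-blank column whose right neighbour is blank or absent), and the spans are zip(starts, ends) -- no run-consuming scan and no scan state at all.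
import Mathlib
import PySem

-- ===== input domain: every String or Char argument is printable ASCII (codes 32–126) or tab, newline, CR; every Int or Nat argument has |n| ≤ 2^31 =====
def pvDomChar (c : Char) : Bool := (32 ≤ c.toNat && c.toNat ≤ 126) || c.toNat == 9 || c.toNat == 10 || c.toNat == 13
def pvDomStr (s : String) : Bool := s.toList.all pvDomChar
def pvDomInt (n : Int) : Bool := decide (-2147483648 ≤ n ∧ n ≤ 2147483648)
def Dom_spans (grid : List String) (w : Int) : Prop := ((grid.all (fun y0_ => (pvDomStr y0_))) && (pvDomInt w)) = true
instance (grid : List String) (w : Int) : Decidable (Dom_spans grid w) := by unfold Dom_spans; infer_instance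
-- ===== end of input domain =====

-- B replaces A's nested run-consuming while-loops by independent edge detection (left edges,
-- right edges, zipped positionally); objective: alternative decomposition, same asymptotic cost.


-- ===== PORT A =====
-- is_blank_col(grid, c): all(row[c] == ' ' for row in grid); row[c] via pyGet? (exact under Pre_,
-- which rules out the out-of-range accesses on which Python raises IndexError)
def isBlankCol (grid : List String) (c : Int) : Bool :=
  grid.all (fun row => PySem.Str.pyGet? row c == some ' ')

-- inner 'while c < w and not is_blank_col(grid, c): c += 1' — returns the final c
def scanRun (grid : List String) (w c : Int) : Int :=
  if c < w ∧ ¬ (isBlankCol grid c = true) then scanRun grid w (c + 1) else c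
termination_by (w - c).toNat
decreasing_by omega

theorem scanRun_ge (grid : List String) (w c : Int) : c ≤ scanRun grid w c := by
  unfold scanRun
  split
  · have := scanRun_ge grid w (c + 1)
    omega
  · omega
termination_by (w - c).toNat
decreasing_by omega

-- outer while loop of A, accumulating res
def spansLoop (grid : List String) (w c : Int) (res : List (Int × Int)) : List (Int × Int) :=
  if _h : c < w then
    if _hb : isBlankCol grid c then
      spansLoop grid w (c + 1) res
    else
      spansLoop grid w (scanRun grid w c) (res ++ [(c, scanRun grid w c)])
  else res
termination_by (w - c).toNat
decreasing_by
  · omega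
  · have h1 : scanRun grid w c = scanRun grid w (c + 1) := by
      rw [scanRun]; simp only [if_pos (And.intro _h _hb)]
    have h2 := scanRun_ge grid w (c + 1)
    omega

def spans (grid : List String) (w : Int) : List (Int × Int) :=
  spansLoop grid w 0 []

-- ===== PORT B =====
-- left edges: non-blank columns whose left neighbour is blank or absent
-- right edges: non-blank columns whose right neighbour is blank or absent, shifted by one
def spans_alt (grid : List String) (w : Int) : List (Int × Int) :=
  let starts := (PySem.List.pyRange 0 w 1).filter
    (fun c => !isBlankCol grid c && (c == 0 || isBlankCol grid (c - 1)))
  let ends := ((PySem.List.pyRange 0 w 1).filter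
    (fun c => !isBlankCol grid c && (c == w - 1 || isBlankCol grid (c + 1)))).map (fun c => c + 1)
  starts.zip ends

-- ===== PRECONDITION & SPEC =====
-- Pre_ excludes exactly the inputs on which Python raises IndexError: some row k shorter than w
-- reaches a column c in [len(row k), w) for which no earlier row has a non-space character at c
-- (all() short-circuits at the first non-space character, so later short rows are never indexed);
-- the 'w ≤ maxLenBefore' conjunct is the c = w - 1 instance, stated separately so the condition
-- is checkable without enumerating a huge range.
-- longest row length among the rows before index k (0 if none)
def maxLenBefore (grid : List String) (k : Nat) : Int :=
  ((grid.take k).map (fun r => (r.toList.length : Int))).foldr max 0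

def Pre_spans (grid : List String) (w : Int) : Prop :=
  ∀ k < grid.length, ((grid[k]?.getD "").toList.length : Int) < w →
    w ≤ maxLenBefore grid k ∧
    ∀ c ∈ PySem.List.pyRange ((grid[k]?.getD "").toList.length : Int) w 1,
      ∃ j < k, c < ((grid[j]?.getD "").toList.length : Int) ∧
        (grid[j]?.getD "").toList[c.toNat]? ≠ some ' '
instance (grid : List String) (w : Int) : Decidable (Pre_spans grid w) := by
  unfold Pre_spans; infer_instance

def pvWitness_spans : List String × Int := (["x  x", "xx  "], 4)

def Spec_spans (grid : List String) (w : Int) (out : List (Int × Int)) : Prop := out = spans_alt grid w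
instance (grid : List String) (w : Int) (out : List (Int × Int)) : Decidable (Spec_spans grid w out) := by unfold Spec_spans; infer_instance

-- ===== CLAIM (what is proved, stated in full; the proofs are below) =====
def Claim_equal_spans : Prop := ∀ (grid : List String) (w : Int), Dom_spans grid w → Pre_spans grid w → Spec_spans grid w (spans grid w)

-- ===== LEMMAS AND PROOFS =====

-- B's two filters, generalized to start at column c (proof-only helpers)
def startsFrom (grid : List String) (w c : Int) : List Int :=
  (PySem.List.pyRange c w 1).filter
    (fun x => !isBlankCol grid x && (x == 0 || isBlankCol grid (x - 1)))

def endsFrom (grid : List String) (w c : Int) : List Int :=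
  ((PySem.List.pyRange c w 1).filter
    (fun x => !isBlankCol grid x && (x == w - 1 || isBlankCol grid (x + 1)))).map (fun x => x + 1)

theorem scanRun_le (grid : List String) (w c : Int) (h : c ≤ w) : scanRun grid w c ≤ w := by
  unfold scanRun
  split
  · exact scanRun_le grid w (c + 1) (by omega)
  · omega
termination_by (w - c).toNat
decreasing_by omega

theorem scanRun_stop (grid : List String) (w c : Int) (h : c ≤ w) :
    scanRun grid w c = w ∨ isBlankCol grid (scanRun grid w c) = true := by
  unfold scanRun
  split
  · rename_i hc
    exact scanRun_stop grid w (c + 1) (by omega)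
  · rename_i hne
    by_cases hb : isBlankCol grid c = true
    · right; exact hb
    · left
      have : ¬ c < w := fun hc => hne ⟨hc, hb⟩
      omega
termination_by (w - c).toNat
decreasing_by omega

theorem spansLoop_append (grid : List String) (w : Int) :
    ∀ (n : Nat) (c : Int) (res : List (Int × Int)), (w - c).toNat ≤ n →
      spansLoop grid w c res = res ++ spansLoop grid w c [] := by
  intro n
  induction n with
  | zero =>
    intro c res hn
    conv_lhs => rw [spansLoop]
    conv_rhs => rw [spansLoop]
    simp [show ¬ c < w by omega]
  | succ n ih =>
    intro c res hn
    by_cases hc : c < w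
    case neg =>
      conv_lhs => rw [spansLoop]
      conv_rhs => rw [spansLoop]
      simp [hc]
    conv_lhs => rw [spansLoop]
    conv_rhs => rw [spansLoop]
    rw [dif_pos hc, dif_pos hc]
    by_cases hb : isBlankCol grid c
    · rw [dif_pos hb, dif_pos hb]
      exact ih (c + 1) res (by omega)
    · rw [dif_neg hb, dif_neg hb]
      have he : scanRun grid w c = scanRun grid w (c + 1) := by
        rw [scanRun]; simp only [if_pos (And.intro hc hb)]
      have hge := scanRun_ge grid w (c + 1)
      rw [ih (scanRun grid w c) (res ++ [(c, scanRun grid w c)]) (by omega),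
          ih (scanRun grid w c) ([] ++ [(c, scanRun grid w c)]) (by omega)]

      simp

-- consuming a run: the columns strictly inside a run contribute no start, and exactly
-- one end (the run's last column), whose shifted value is scanRun
theorem run_lemma (grid : List String) (w : Int) :
    ∀ (n : Nat) (x : Int), (w - x).toNat ≤ n → 0 ≤ x → x < w → ¬ (isBlankCol grid x = true) →
      startsFrom grid w (x + 1) = startsFrom grid w (scanRun grid w x) ∧
      endsFrom grid w x = scanRun grid w x :: endsFrom grid w (scanRun grid w x) := by
  intro n
  induction n with
  | zero => intro x hn hx0 hxw; omega
  | succ n ih =>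
    intro x hn hx0 hxw hb
    have he : scanRun grid w x = scanRun grid w (x + 1) := by
      rw [scanRun]; simp only [if_pos (And.intro hxw hb)]
    by_cases hnext : (x + 1 < w ∧ ¬ (isBlankCol grid (x + 1) = true))
    · -- run continues at x+1
      obtain ⟨hw1, hb1⟩ := hnext
      have ih1 := ih (x + 1) (by omega) (by omega) hw1 hb1
      constructor
      · -- startsFrom (x+1) = startsFrom (x+2) since x+1 is not a start (x non-blank, x+1 ≠ 0)
        rw [startsFrom, PySem.List.pyRange_one_cons hw1, List.filter_cons_of_neg]
        · rw [he]; exact ih1.1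
        · intro hcontra
          rcases Bool.and_eq_true_iff.mp hcontra with ⟨-, h2⟩
          rcases Bool.or_eq_true_iff.mp h2 with h3 | h3
          · have := beq_iff_eq.mp h3; omega
          · have hx : x + 1 - 1 = x := by omega
            rw [hx] at h3
            exact hb h3
      · -- endsFrom x = endsFrom (x+1) since x is not an end (x+1 < w and non-blank)
        rw [endsFrom, PySem.List.pyRange_one_cons hxw, List.filter_cons_of_neg]
        · rw [he]; exact ih1.2
        · intro hcontra
          rcases Bool.and_eq_true_iff.mp hcontra with ⟨-, h2⟩
          rcases Bool.or_eq_true_iff.mp h2 with h3 | h3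
          · have := beq_iff_eq.mp h3; omega
          · exact hb1 h3
    · -- run stops at x+1: scanRun x = x+1
      have hstop : scanRun grid w (x + 1) = x + 1 := by
        rw [scanRun]; rw [if_neg]; intro hc; exact hnext hc
      have hsx : scanRun grid w x = x + 1 := by rw [he, hstop]
      constructor
      · rw [hsx]
      · rw [endsFrom, PySem.List.pyRange_one_cons hxw, List.filter_cons_of_pos]
        · rw [hsx]
          simp only [List.map_cons]
          rw [endsFrom]
        · simp only [Bool.and_eq_true, Bool.or_eq_true]
          refine ⟨by simpa using hb, ?_⟩
          rcases Decidable.em (x + 1 < w) with hlt | hge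
          · right
            by_contra hbx
            exact hnext ⟨hlt, by simpa using hbx⟩
          · left
            exact beq_iff_eq.mpr (by omega)

-- main invariant: from any column c that could start a run, zip of the two edge lists
-- equals A's outer loop from c
theorem main_inv (grid : List String) (w : Int) :
    ∀ (n : Nat) (c : Int), (w - c).toNat ≤ n → 0 ≤ c →
      (c < w → ¬ (isBlankCol grid c = true) → (c = 0 ∨ isBlankCol grid (c - 1) = true)) →
      (startsFrom grid w c).zip (endsFrom grid w c) = spansLoop grid w c [] := by
  intro n
  induction n with
  | zero =>
    intro c hn hc0 _
    have hcw : w ≤ c := by omega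
    rw [startsFrom, endsFrom, PySem.List.pyRange_one_eq_nil hcw, spansLoop]
    simp [show ¬ c < w by omega]
  | succ n ih =>
    intro c hn hc0 hp
    by_cases hcw : c < w
    case neg =>
      rw [startsFrom, endsFrom, PySem.List.pyRange_one_eq_nil (by omega), spansLoop]
      simp [hcw]
    rw [spansLoop, dif_pos hcw]
    by_cases hb : isBlankCol grid c
    · rw [dif_pos hb]
      have hs : startsFrom grid w c = startsFrom grid w (c + 1) := by
        rw [startsFrom, PySem.List.pyRange_one_cons hcw, List.filter_cons_of_neg]
        · rfl
        · simp [hb]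
      have hef : endsFrom grid w c = endsFrom grid w (c + 1) := by
        rw [endsFrom, PySem.List.pyRange_one_cons hcw, List.filter_cons_of_neg]
        · rfl
        · simp [hb]
      rw [hs, hef]
      exact ih (c + 1) (by omega) (by omega) (fun _ _ => Or.inr (by simpa using hb))
    · rw [dif_neg hb]
      have hrun := run_lemma grid w (w - c).toNat c (le_refl _) hc0 hcw hb
      have hstart : startsFrom grid w c = c :: startsFrom grid w (scanRun grid w c) := by
        rw [startsFrom, PySem.List.pyRange_one_cons hcw, List.filter_cons_of_pos]
        · have h1 := hrun.1
          rw [startsFrom] at h1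
          rw [h1]
        · simp only [Bool.and_eq_true, Bool.or_eq_true]
          refine ⟨by simpa using hb, ?_⟩
          rcases hp hcw hb with h | h
          · left; exact beq_iff_eq.mpr h
          · right; exact h
      rw [hstart, hrun.2, List.zip_cons_cons]
      have hge : c < scanRun grid w c := by
        have h1 : scanRun grid w c = scanRun grid w (c + 1) := by
          rw [scanRun]; simp only [if_pos (And.intro hcw hb)]
        have := scanRun_ge grid w (c + 1); omega
      have hle : scanRun grid w c ≤ w := scanRun_le grid w c (by omega)
      have hrec := ih (scanRun grid w c) (by omega) (by omega)
        (fun hlt hnb => by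
          rcases scanRun_stop grid w c (by omega) with h | h
          · omega
          · exact absurd h hnb)
      rw [hrec]
      have happ := spansLoop_append grid w ((w - scanRun grid w c).toNat) (scanRun grid w c)
        [(c, scanRun grid w c)] (le_refl _)
      simp only [List.nil_append]
      rw [happ]
      rfl

-- ===== VERDICT (by name: the statement is the Claim_ definition above) =====
theorem spans_spec : Claim_equal_spans := by
  intro grid w _ _
  unfold Spec_spans spans spans_alt
  have := main_inv grid w (w - 0).toNat 0 (le_refl _) le_rfl (fun _ _ => Or.inl rfl)
  rw [startsFrom, endsFrom] at this
  exact this.symm
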